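-- pv_equiv track=rewrite | github.com/amyamyloyd/imlaw | model_analysis/generate_correct_collection_mapping.py | determine_collection_type
-- ===== SOURCE A (Python) =====
-- def determine_collection_type(field_data_list: list) -> str:
--     """Determine collection type based on field patterns"""
--     # Check if any field has specific collection type
--     collection_types = set()
--     for field_data in field_data_list:
--         ctype = field_data.get('collection_type', 'standard')
--         if ctype != 'standard':
--             collection_types.add(ctype)
--
--     # Return the most specific type found
--     if 'one_to_many' in collection_types:
--         return 'one_to_many'
--     elif 'repeating' in collection_types:
--         return 'repeating'
--     elif 'grouped_checkboxes' in collection_types: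
--         return 'grouped_checkboxes'
--     elif 'one_to_one' in collection_types:
--         return 'one_to_one'
--     else:
--         return 'standard'
-- ===== SOURCE B (Python) =====
-- _RANK = {'one_to_many': 0, 'repeating': 1, 'grouped_checkboxes': 2, 'one_to_one': 3}
-- _NAME = ['one_to_many', 'repeating', 'grouped_checkboxes', 'one_to_one', 'standard']
--
--
-- def determine_collection_type(field_data_list: list) -> str:
--     """Determine collection type based on field patterns"""
--     # One pass keeping only the best (smallest) priority rank seen so far;
--     # unknown / 'standard' values rank as the sentinel 4 and never win.
--     best = 4
--     for field_data in field_data_list: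
--         best = min(best, _RANK.get(field_data.get('collection_type', 'standard'), 4))
--     return _NAME[best]
-- ===== Notes on version B (the rewrite author's own statement) =====
-- stated objective: simpler
-- what changed: Replaces the set accumulation plus four-way membership chain by a single pass that keeps the minimum priority rank of the known collection types, indexing a name table at the end.
import Mathlib
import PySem

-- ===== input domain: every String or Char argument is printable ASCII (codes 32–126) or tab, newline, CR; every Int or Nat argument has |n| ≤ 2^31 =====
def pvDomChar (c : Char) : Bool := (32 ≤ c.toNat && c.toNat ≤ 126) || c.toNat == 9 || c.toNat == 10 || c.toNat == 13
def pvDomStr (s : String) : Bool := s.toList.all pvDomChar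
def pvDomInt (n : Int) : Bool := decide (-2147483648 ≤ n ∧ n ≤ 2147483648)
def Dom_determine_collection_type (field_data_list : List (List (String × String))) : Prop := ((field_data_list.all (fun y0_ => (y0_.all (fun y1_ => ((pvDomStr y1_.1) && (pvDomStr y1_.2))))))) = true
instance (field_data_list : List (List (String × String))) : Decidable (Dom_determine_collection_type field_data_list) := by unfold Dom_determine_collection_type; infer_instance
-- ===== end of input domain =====

-- B replaces A's set accumulation + membership chain by a single min-rank pass; objective: simpler.

-- ===== PORT A =====
-- set-building loop, then the most-specific-first membership chain
def determine_collection_type (field_data_list : List (List (String × String))) : String :=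
  let collection_types : PySem.Set String :=
    field_data_list.foldl (fun s field_data =>
      let ctype := (PySem.Dict.mk field_data).getD "collection_type" "standard"
      if ctype ≠ "standard" then PySem.Set.add s ctype else s) PySem.Set.empty
  if "one_to_many" ∈ collection_types then "one_to_many"
  else if "repeating" ∈ collection_types then "repeating"
  else if "grouped_checkboxes" ∈ collection_types then "grouped_checkboxes"
  else if "one_to_one" ∈ collection_types then "one_to_one"
  else "standard"

-- ===== PORT B =====
-- _RANK.get(t, 4): the literal rank dict of Source B, ported as its lookup function (exact: four fixed keys)
def ctRank (t : String) : Nat :=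
  if t = "one_to_many" then 0
  else if t = "repeating" then 1
  else if t = "grouped_checkboxes" then 2
  else if t = "one_to_one" then 3
  else 4

-- _NAME[best]
def ctName (r : Nat) : String :=
  ["one_to_many", "repeating", "grouped_checkboxes", "one_to_one", "standard"].getD r "standard"

def determine_collection_type_alt (field_data_list : List (List (String × String))) : String :=
  let best :=
    field_data_list.foldl (fun best field_data =>
      min best (ctRank ((PySem.Dict.mk field_data).getD "collection_type" "standard"))) 4
  ctName best

-- ===== PRECONDITION & SPEC =====
def Spec_determine_collection_type (field_data_list : List (List (String × String))) (out : String) : Prop := out = determine_collection_type_alt field_data_list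
instance (field_data_list : List (List (String × String))) (out : String) : Decidable (Spec_determine_collection_type field_data_list out) := by unfold Spec_determine_collection_type; infer_instance

-- ===== CLAIM (what is proved, stated in full; the proofs are below) =====
def Claim_equal_determine_collection_type : Prop := ∀ (field_data_list : List (List (String × String))), Dom_determine_collection_type field_data_list → Spec_determine_collection_type field_data_list (determine_collection_type field_data_list)

-- ===== LEMMAS AND PROOFS =====

-- the ctype a field contributes
def ctOf (field_data : List (String × String)) : String :=
  (PySem.Dict.mk field_data).getD "collection_type" "standard"

-- membership in A's accumulated set
lemma mem_setFold (l : List (List (String × String))) (s : PySem.Set String) (y : String) :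
    y ∈ l.foldl (fun s fd => if ctOf fd ≠ "standard" then PySem.Set.add s (ctOf fd) else s) s ↔
      y ∈ s ∨ ∃ fd ∈ l, ctOf fd = y ∧ y ≠ "standard" := by
  induction l generalizing s with
  | nil => simp
  | cons fd t ih =>
    simp only [List.foldl_cons, List.mem_cons]
    rw [ih]
    by_cases h : ctOf fd = "standard" <;> simp [h, PySem.Set.mem_add] <;> aesop

-- B's fold bracketed
lemma bestFold_le (l : List (List (String × String))) (b r : Nat) :
    l.foldl (fun best fd => min best (ctRank (ctOf fd))) b ≤ r ↔
      b ≤ r ∨ ∃ fd ∈ l, ctRank (ctOf fd) ≤ r := by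
  induction l generalizing b with
  | nil => simp
  | cons fd t ih =>
    simp only [List.foldl_cons, List.mem_cons]
    rw [ih]
    simp only [min_le_iff]
    aesop

-- rank characterization of the four known types
lemma rank_le0 (x : String) : ctRank x ≤ 0 ↔ x = "one_to_many" := by
  unfold ctRank; split_ifs <;> simp_all
lemma rank_le1 (x : String) : ctRank x ≤ 1 ↔ x = "one_to_many" ∨ x = "repeating" := by
  unfold ctRank; split_ifs <;> simp_all
lemma rank_le2 (x : String) : ctRank x ≤ 2 ↔ x = "one_to_many" ∨ x = "repeating" ∨ x = "grouped_checkboxes" := by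
  unfold ctRank; split_ifs <;> simp_all
lemma rank_le3 (x : String) : ctRank x ≤ 3 ↔ x = "one_to_many" ∨ x = "repeating" ∨ x = "grouped_checkboxes" ∨ x = "one_to_one" := by
  unfold ctRank; split_ifs <;> simp_all

theorem determine_collection_type_spec : Claim_equal_determine_collection_type := by
  intro l _
  show (let collection_types := l.foldl (fun s fd => if ctOf fd ≠ "standard" then PySem.Set.add s (ctOf fd) else s) PySem.Set.empty
        if "one_to_many" ∈ collection_types then "one_to_many"
        else if "repeating" ∈ collection_types then "repeating"
        else if "grouped_checkboxes" ∈ collection_types then "grouped_checkboxes"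
        else if "one_to_one" ∈ collection_types then "one_to_one"
        else "standard") =
      ctName (l.foldl (fun best fd => min best (ctRank (ctOf fd))) 4)
  have hm := fun y => mem_setFold l PySem.Set.empty y
  have hb := fun r => bestFold_le l 4 r
  set S := l.foldl (fun s fd => if ctOf fd ≠ "standard" then PySem.Set.add s (ctOf fd) else s) PySem.Set.empty with hS
  set best := l.foldl (fun best fd => min best (ctRank (ctOf fd))) 4 with hB
  simp only [PySem.Set.empty, List.not_mem_nil, false_or] at hm
  have e0 : ("one_to_many" ∈ S) ↔ ∃ fd ∈ l, ctOf fd = "one_to_many" := by rw [hm]; simp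
  have e1 : ("repeating" ∈ S) ↔ ∃ fd ∈ l, ctOf fd = "repeating" := by rw [hm]; simp
  have e2 : ("grouped_checkboxes" ∈ S) ↔ ∃ fd ∈ l, ctOf fd = "grouped_checkboxes" := by rw [hm]; simp
  have e3 : ("one_to_one" ∈ S) ↔ ∃ fd ∈ l, ctOf fd = "one_to_one" := by rw [hm]; simp
  simp only [e0, e1, e2, e3]
  by_cases h0 : ∃ fd ∈ l, ctOf fd = "one_to_many"
  · have : best ≤ 0 := (hb 0).mpr (Or.inr (by simpa only [rank_le0] using h0))
    have hbv : best = 0 := by omega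
    rw [if_pos h0, hbv]; rfl
  · rw [if_neg h0]
    have n0 : ¬ best ≤ 0 := by
      intro h; rcases (hb 0).mp h with h | h
      · omega
      · exact h0 (by simpa only [rank_le0] using h)
    by_cases h1 : ∃ fd ∈ l, ctOf fd = "repeating"
    · have : best ≤ 1 := (hb 1).mpr (Or.inr (by simp only [rank_le1]; aesop))
      have hbv : best = 1 := by omega
      rw [if_pos h1, hbv]; rfl
    · rw [if_neg h1]
      have n1 : ¬ best ≤ 1 := by
        intro h; rcases (hb 1).mp h with h | h
        · omega
        · simp only [rank_le1] at h; aesop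
      by_cases h2 : ∃ fd ∈ l, ctOf fd = "grouped_checkboxes"
      · have : best ≤ 2 := (hb 2).mpr (Or.inr (by simp only [rank_le2]; aesop))
        have hbv : best = 2 := by omega
        rw [if_pos h2, hbv]; rfl
      · rw [if_neg h2]
        have n2 : ¬ best ≤ 2 := by
          intro h; rcases (hb 2).mp h with h | h
          · omega
          · simp only [rank_le2] at h; aesop
        by_cases h3 : ∃ fd ∈ l, ctOf fd = "one_to_one"
        · have : best ≤ 3 := (hb 3).mpr (Or.inr (by simp only [rank_le3]; aesop))
          have hbv : best = 3 := by omega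
          rw [if_pos h3, hbv]; rfl
        · rw [if_neg h3]
          have n3 : ¬ best ≤ 3 := by
            intro h; rcases (hb 3).mp h with h | h
            · omega
            · simp only [rank_le3] at h; aesop
          have h4 : best ≤ 4 := (hb 4).mpr (Or.inl (by omega))
          have hbv : best = 4 := by omega
          rw [hbv]; rfl
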